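-- pv_equiv track=rewrite | github.com/Gjfnofalse/Unicert-tls_libs_difftest | CertificateDecodingChecker/DecodingDetection.py | DecodingDetectorEx
-- ===== SOURCE A (Python) =====
-- def DecodingDetectorEx(raw:str,res:str)-> str | None:
--     if len(raw) > len(res):
--         num_matched_chars = 0
--         for i in range(len(res)):
--             if raw[i]!=res[i]:
--                 return "possible_truncation"
--         return "truncation"
--
--     if len(raw) < len(res):
--         for i in range(len(raw)):
--             if raw[i] != res[i]:
--                 remainings = len(raw) - i-1
--                 if remainings >0:
--                     if raw[-remainings] == res[-remainings]:
--                         return "escaping"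
--                     else:
--                         return "possible_escaping"
--                 else:
--                     return "escaping"
--         return "possible_escaping"
--
--     if len(raw) == len(res):
--         num_matched_chars = 0
--         for i in range(len(raw)):
--             if raw[i] ==res[i]:
--                 num_matched_chars = num_matched_chars + 1
--
--         if num_matched_chars == len(raw) -1:
--             return "replacement"
--         else:
--             return "possible_replacement"
-- ===== SOURCE B (Python) =====
-- def DecodingDetectorEx(raw: str, res: str) -> str | None:
--     nr, ns = len(raw), len(res)
--     m = min(nr, ns)
--     p = 0
--     while p < m and raw[p] == res[p]:
--         p += 1
--     if nr > ns:
--         return "truncation" if p == ns else "possible_truncation"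
--     if nr == ns:
--         q = 0
--         while q < nr and raw[nr - 1 - q] == res[ns - 1 - q]:
--             q += 1
--         return "replacement" if p + q == nr - 1 else "possible_replacement"
--     if p == nr:
--         return "possible_escaping"
--     remainings = nr - p - 1
--     if remainings == 0:
--         return "escaping"
--     return "escaping" if raw[-remainings] == res[-remainings] else "possible_escaping"
-- ===== Notes on version B (the rewrite author's own statement) =====
-- stated objective: alternative
-- what changed: B scans from both ends: it computes the longest common prefix length p and, for equal lengths, the longest common suffix length q, then classifies arithmetically (truncation iff p==len(res); replacement iff p+q==n-1, replacing A's match counting; escaping branch keyed on p as the first mismatch), instead of A's three per-branch forward mismatch scans.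
import Mathlib
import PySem

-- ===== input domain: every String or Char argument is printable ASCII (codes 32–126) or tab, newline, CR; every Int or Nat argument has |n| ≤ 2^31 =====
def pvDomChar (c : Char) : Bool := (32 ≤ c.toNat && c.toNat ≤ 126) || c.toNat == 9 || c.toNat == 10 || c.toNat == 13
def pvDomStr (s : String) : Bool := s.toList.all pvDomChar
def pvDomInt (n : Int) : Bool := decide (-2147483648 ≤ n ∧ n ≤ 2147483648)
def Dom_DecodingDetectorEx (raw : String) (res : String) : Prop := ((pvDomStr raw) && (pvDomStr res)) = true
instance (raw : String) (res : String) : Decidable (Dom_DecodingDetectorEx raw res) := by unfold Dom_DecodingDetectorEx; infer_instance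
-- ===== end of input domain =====

-- B classifies via a two-ended scan (longest common prefix, and for equal lengths the
-- longest common suffix, with 'replacement' iff p+q = n-1) instead of A's per-branch
-- forward mismatch scans and match counting (alternative decomposition, same cost).

-- ===== PORT A =====
-- raw[i] with 0 ≤ i < length, exact there
def pvGetc (l : List Char) (i : Nat) : Char := l.getD i ' '

-- loop 'for i in range(len(res)): if raw[i]!=res[i]: return "possible_truncation"'
def pvA_truncLoop (r s : List Char) : List Nat → Option String
  | [] => some "truncation"
  | i :: rest =>
    if pvGetc r i ≠ pvGetc s i then some "possible_truncation"
    else pvA_truncLoop r s rest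

-- loop 'for i in range(len(raw)): if raw[i]!=res[i]: …' of the len(raw)<len(res) branch;
-- raw[-remainings] is in range there, ported as getD at length - remainings
def pvA_escLoop (r s : List Char) : List Nat → Option String
  | [] => some "possible_escaping"
  | i :: rest =>
    if pvGetc r i ≠ pvGetc s i then
      let remainings := r.length - i - 1
      if remainings > 0 then
        if pvGetc r (r.length - remainings) = pvGetc s (s.length - remainings) then
          some "escaping"
        else some "possible_escaping"
      else some "escaping"
    else pvA_escLoop r s rest

def DecodingDetectorEx (raw : String) (res : String) : Option String :=
  let r := raw.toList
  let s := res.toList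
  if r.length > s.length then pvA_truncLoop r s (List.range s.length)
  else if r.length < s.length then pvA_escLoop r s (List.range r.length)
  else
    let m : Int := (List.range r.length).foldl
      (fun acc i => if pvGetc r i = pvGetc s i then acc + 1 else acc) 0
    if m = (r.length : Int) - 1 then some "replacement" else some "possible_replacement"

-- ===== PORT B =====
-- 'while p < m and raw[p] == res[p]: p += 1' — fuel m - p, so fuel encodes p < m
def pvB_pref (r s : List Char) : Nat → Nat → Nat
  | 0, p => p
  | fuel + 1, p => if pvGetc r p = pvGetc s p then pvB_pref r s fuel (p + 1) else p

-- 'while q < n and raw[n-1-q] == res[n-1-q]: q += 1'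
def pvB_suf (r s : List Char) : Nat → Nat → Nat
  | 0, q => q
  | fuel + 1, q =>
    if pvGetc r (r.length - 1 - q) = pvGetc s (s.length - 1 - q) then pvB_suf r s fuel (q + 1)
    else q

def DecodingDetectorEx_alt (raw : String) (res : String) : Option String :=
  let r := raw.toList
  let s := res.toList
  let m := min r.length s.length
  let p := pvB_pref r s m 0
  if r.length > s.length then
    if p = s.length then some "truncation" else some "possible_truncation"
  else if r.length = s.length then
    let q := pvB_suf r s r.length 0
    if (p : Int) + (q : Int) = (r.length : Int) - 1 then some "replacement"
    else some "possible_replacement"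
  else
    if p = r.length then some "possible_escaping"
    else
      let remainings := r.length - p - 1
      if remainings = 0 then some "escaping"
      else if pvGetc r (r.length - remainings) = pvGetc s (s.length - remainings) then
        some "escaping"
      else some "possible_escaping"

-- ===== PRECONDITION & SPEC =====
def Spec_DecodingDetectorEx (raw : String) (res : String) (out : Option String) : Prop := out = DecodingDetectorEx_alt raw res
instance (raw : String) (res : String) (out : Option String) : Decidable (Spec_DecodingDetectorEx raw res out) := by unfold Spec_DecodingDetectorEx; infer_instance

-- ===== CLAIM (what is proved, stated in full; the proofs are below) =====
def Claim_equal_DecodingDetectorEx : Prop := ∀ (raw : String) (res : String), Dom_DecodingDetectorEx raw res → Spec_DecodingDetectorEx raw res (DecodingDetectorEx raw res)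

-- ===== LEMMAS AND PROOFS =====

theorem pref_spec (r s : List Char) (fuel p0 : Nat) :
    p0 ≤ pvB_pref r s fuel p0 ∧ pvB_pref r s fuel p0 ≤ p0 + fuel ∧
    (∀ j, p0 ≤ j → j < pvB_pref r s fuel p0 → pvGetc r j = pvGetc s j) ∧
    (pvB_pref r s fuel p0 < p0 + fuel →
      pvGetc r (pvB_pref r s fuel p0) ≠ pvGetc s (pvB_pref r s fuel p0)) := by
  induction fuel generalizing p0 with
  | zero => refine ⟨le_refl _, by simp [pvB_pref], ?_, ?_⟩ <;> simp [pvB_pref] <;> omega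
  | succ fuel ih =>
    by_cases h : pvGetc r p0 = pvGetc s p0
    · obtain ⟨h1, h2, h3, h4⟩ := ih (p0 + 1)
      refine ⟨?_, ?_, ?_, ?_⟩ <;> simp only [pvB_pref, if_pos h]
      · omega
      · omega
      · intro j hj1 hj2
        rcases Nat.eq_or_lt_of_le hj1 with rfl | hlt
        · exact h
        · exact h3 j hlt hj2
      · intro hlt; exact h4 (by omega)
    · refine ⟨?_, ?_, ?_, ?_⟩ <;> simp only [pvB_pref, if_neg h]
      · exact le_refl _
      · omega
      · intro j hj1 hj2; omega
      · intro _; exact h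

theorem suf_spec (r s : List Char) (fuel q0 : Nat) :
    q0 ≤ pvB_suf r s fuel q0 ∧ pvB_suf r s fuel q0 ≤ q0 + fuel ∧
    (∀ j, q0 ≤ j → j < pvB_suf r s fuel q0 →
      pvGetc r (r.length - 1 - j) = pvGetc s (s.length - 1 - j)) ∧
    (pvB_suf r s fuel q0 < q0 + fuel →
      pvGetc r (r.length - 1 - pvB_suf r s fuel q0) ≠
        pvGetc s (s.length - 1 - pvB_suf r s fuel q0)) := by
  induction fuel generalizing q0 with
  | zero => refine ⟨le_refl _, by simp [pvB_suf], ?_, ?_⟩ <;> simp [pvB_suf] <;> omega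
  | succ fuel ih =>
    by_cases h : pvGetc r (r.length - 1 - q0) = pvGetc s (s.length - 1 - q0)
    · obtain ⟨h1, h2, h3, h4⟩ := ih (q0 + 1)
      refine ⟨?_, ?_, ?_, ?_⟩ <;> simp only [pvB_suf, if_pos h]
      · omega
      · omega
      · intro j hj1 hj2
        rcases Nat.eq_or_lt_of_le hj1 with rfl | hlt
        · exact h
        · exact h3 j hlt hj2
      · intro hlt; exact h4 (by omega)
    · refine ⟨?_, ?_, ?_, ?_⟩ <;> simp only [pvB_suf, if_neg h]
      · exact le_refl _
      · omega
      · intro j hj1 hj2; omega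
      · intro _; exact h

theorem truncLoop_pref (r s : List Char) (fuel p0 : Nat) :
    pvA_truncLoop r s (List.range' p0 fuel) =
      (if pvB_pref r s fuel p0 = p0 + fuel then some "truncation"
       else some "possible_truncation") := by
  induction fuel generalizing p0 with
  | zero => simp [pvA_truncLoop, pvB_pref]
  | succ fuel ih =>
    rw [List.range'_succ]
    by_cases h : pvGetc r p0 = pvGetc s p0
    · rw [show pvA_truncLoop r s (p0 :: List.range' (p0 + 1) fuel)
            = pvA_truncLoop r s (List.range' (p0 + 1) fuel) from by simp [pvA_truncLoop, h],
          ih,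
          show pvB_pref r s (fuel + 1) p0 = pvB_pref r s fuel (p0 + 1) from by
            simp [pvB_pref, h],
          show p0 + 1 + fuel = p0 + (fuel + 1) from by omega]
    · rw [show pvA_truncLoop r s (p0 :: List.range' (p0 + 1) fuel)
            = some "possible_truncation" from by simp [pvA_truncLoop, h],
          show pvB_pref r s (fuel + 1) p0 = p0 from by simp [pvB_pref, h],
          if_neg (by omega)]

theorem escLoop_pref (r s : List Char) (fuel p0 : Nat) :
    pvA_escLoop r s (List.range' p0 fuel) =
      (if pvB_pref r s fuel p0 = p0 + fuel then some "possible_escaping"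
       else
        let i := pvB_pref r s fuel p0
        let remainings := r.length - i - 1
        if remainings = 0 then some "escaping"
        else if pvGetc r (r.length - remainings) = pvGetc s (s.length - remainings) then
          some "escaping"
        else some "possible_escaping") := by
  induction fuel generalizing p0 with
  | zero => simp [pvA_escLoop, pvB_pref]
  | succ fuel ih =>
    rw [List.range'_succ]
    by_cases h : pvGetc r p0 = pvGetc s p0
    · rw [show pvA_escLoop r s (p0 :: List.range' (p0 + 1) fuel)
            = pvA_escLoop r s (List.range' (p0 + 1) fuel) from by simp [pvA_escLoop, h],
          ih,
          show pvB_pref r s (fuel + 1) p0 = pvB_pref r s fuel (p0 + 1) from by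
            simp [pvB_pref, h],
          show p0 + 1 + fuel = p0 + (fuel + 1) from by omega]
    · rw [show pvB_pref r s (fuel + 1) p0 = p0 from by simp [pvB_pref, h],
          if_neg (by omega : ¬ (p0 = p0 + (fuel + 1)))]
      by_cases h0 : r.length - p0 - 1 = 0
      · simp [pvA_escLoop, h, h0]
      · simp only [pvA_escLoop, h, ite_not, if_neg h0,
          if_pos (by omega : r.length - p0 - 1 > 0)]
        simp [h]

-- A's match count as n minus the number of mismatching indices
theorem matchCount_filter (r s : List Char) (is : List Nat) (acc : Int) :
    is.foldl (fun acc i => if pvGetc r i = pvGetc s i then acc + 1 else acc) acc =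
      acc + (is.length : Int) - ((is.filter (fun i => pvGetc r i ≠ pvGetc s i)).length : Int) := by
  induction is generalizing acc with
  | nil => simp
  | cons i rest ih =>
    by_cases h : pvGetc r i = pvGetc s i <;>
      simp [h, ih] <;> ring

-- equal lengths: exactly one mismatch ↔ lcp + lcs = n - 1
theorem one_mismatch_iff (r s : List Char) (hn : r.length = s.length) :
    (((List.range r.length).filter (fun i => pvGetc r i ≠ pvGetc s i)).length = 1)
    ↔ ((pvB_pref r s r.length 0 : Int) + (pvB_suf r s r.length 0 : Int)
        = (r.length : Int) - 1) := by
  obtain ⟨-, hp2, hp3, hp4⟩ := pref_spec r s r.length 0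
  obtain ⟨-, hq2, hq3, hq4⟩ := suf_spec r s r.length 0
  rw [← hn] at hq3 hq4
  simp only [Nat.zero_add] at hp2 hq2 hp4 hq4
  set p := pvB_pref r s r.length 0 with hp
  set q := pvB_suf r s r.length 0 with hq
  set D := (List.range r.length).filter (fun i => pvGetc r i ≠ pvGetc s i) with hD
  have memD : ∀ i, i ∈ D ↔ (i < r.length ∧ pvGetc r i ≠ pvGetc s i) := by
    intro i; simp [hD, List.mem_filter, List.mem_range]
  constructor
  · intro hlen
    obtain ⟨a, ha⟩ := List.length_eq_one_iff.mp hlen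
    have haD : a ∈ D := by rw [ha]; exact List.mem_singleton_self a
    obtain ⟨han, hamis⟩ := (memD a).mp haD
    have huniq : ∀ j, j < r.length → pvGetc r j ≠ pvGetc s j → j = a := by
      intro j hj hjm
      have : j ∈ D := (memD j).mpr ⟨hj, hjm⟩
      rw [ha] at this; simpa using this
    have hpn : p < r.length := by
      rcases Nat.lt_or_ge p r.length with h | h
      · exact h
      · exact absurd (hp3 a (Nat.zero_le _) (by omega)) hamis
    have hpa : p = a := huniq p hpn (hp4 hpn)
    have hqn : q < r.length := by
      rcases Nat.lt_or_ge q r.length with h | h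
      · exact h
      · have hc := hq3 (r.length - 1 - a) (Nat.zero_le _) (by omega)
        rw [show r.length - 1 - (r.length - 1 - a) = a from by omega] at hc
        exact absurd hc hamis
    have hqa : r.length - 1 - q = a := by
      have hc := hq4 hqn
      exact huniq _ (by omega) hc
    omega
  · intro hsum
    have hpn : p < r.length := by omega
    have hmis : pvGetc r p ≠ pvGetc s p := hp4 hpn
    have hall : ∀ j ∈ D, j = p := by
      intro j hj
      obtain ⟨hjn, hjm⟩ := (memD j).mp hj
      rcases Nat.lt_trichotomy j p with h | h | h
      · exact absurd (hp3 j (Nat.zero_le _) h) hjm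
      · exact h
      · exfalso
        have hj' : r.length - 1 - j < q := by omega
        have hc := hq3 (r.length - 1 - j) (Nat.zero_le _) hj'
        rw [show r.length - 1 - (r.length - 1 - j) = j from by omega] at hc
        exact hjm hc
    have hpD : p ∈ D := (memD p).mpr ⟨hpn, hmis⟩
    have hnd : D.Nodup := List.Nodup.filter _ (List.nodup_range)
    match hDe : D, hpD, hnd, hall with
    | [], hpD, _, _ => exact absurd hpD (by simp)
    | [x], _, _, _ => rfl
    | x :: y :: t, _, hnd, hall =>
      have hx : x = p := hall x (by simp)
      have hy : y = p := hall y (by simp)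
      exact absurd (hx.trans hy.symm) (by
        have := hnd; simp at this; tauto)

-- ===== VERDICT (by name: the statement is the Claim_ definition above) =====
theorem DecodingDetectorEx_spec : Claim_equal_DecodingDetectorEx := by
  intro raw res _
  unfold Spec_DecodingDetectorEx DecodingDetectorEx DecodingDetectorEx_alt
  set r := raw.toList with hr
  set s := res.toList with hs
  by_cases hgt : r.length > s.length
  · have hmin : min r.length s.length = s.length := by omega
    simp only [hmin, if_pos hgt, List.range_eq_range', truncLoop_pref, Nat.zero_add]
  · by_cases hlt : r.length < s.length
    · have hmin : min r.length s.length = r.length := by omega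
      have hne : ¬ r.length = s.length := by omega
      simp only [hmin, if_neg hgt, if_pos hlt, if_neg hne, List.range_eq_range',
        escLoop_pref, Nat.zero_add]
    · have heq : r.length = s.length := by omega
      have hmin : min r.length s.length = r.length := by omega
      simp only [hmin, if_neg hgt, if_neg hlt, if_pos heq, matchCount_filter,
        List.length_range]
      by_cases hone :
          ((List.range r.length).filter (fun i => pvGetc r i ≠ pvGetc s i)).length = 1
      · rw [if_pos (by rw [hone]; push_cast; ring),
           if_pos ((one_mismatch_iff r s heq).mp hone)]
      · have hlen : ((List.range r.length).filter
            (fun i => pvGetc r i ≠ pvGetc s i)).length ≤ r.length := by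
          simpa using List.length_filter_le _ (List.range r.length)
        rw [if_neg (by push_cast; omega),
           if_neg (fun h => hone ((one_mismatch_iff r s heq).mpr h))]
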